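-- pv_equiv track=rewrite | github.com/Grafsuvorov/Grafsuvorov | main.py | recursive_reverse_search
-- ===== SOURCE A (Python) =====
-- from typing import List, Dict, Tuple, Set
-- from typing import List, Dict, Tuple
--
-- def recursive_reverse_search(
--     start_schema: str,
--     start_table: str,
--     reverse_index: Dict[Tuple[str, str], List[Dict]],
--     visited: Set[Tuple[str, str]] = None
-- ) -> List[Dict]:
--     if visited is None:
--         visited = set()
--     key = (start_schema, start_table)
--     if key in visited:
--         return []
--     visited.add(key)
--     dependents = reverse_index.get(key, [])
--     result = []
--     for dep in dependents:
--         result.append(dep)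
--         result.extend(
--             recursive_reverse_search(dep["schema"], dep["table_name"], reverse_index, visited)
--         )
--     return result
-- ===== SOURCE B (Python) =====
-- def recursive_reverse_search(start_schema, start_table, reverse_index, visited=None):
--     if visited is None:
--         visited = set()
--     key = (start_schema, start_table)
--     if key in visited:
--         return []
--     visited.add(key)
--     result = []
--     stack = [iter(reverse_index.get(key, []))]
--     while stack:
--         dep = next(stack[-1], None)
--         if dep is None:
--             stack.pop()
--             continue
--         result.append(dep)
--         k = (dep["schema"], dep["table_name"])
--         if k not in visited:
--             visited.add(k)
--             ds = reverse_index.get(k)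
--             if ds:
--                 stack.append(iter(ds))
--     return result
-- ===== Notes on version B (the rewrite author's own statement) =====
-- stated objective: alternative
-- what changed: Replaced A's recursive DFS (function recursion per node, list-concatenating results) by an iterative DFS that keeps an explicit stack of iterators over dependent lists and appends each dependent to a single result list; same pre-order, per-edge emission and visited mutation.
import Mathlib
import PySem

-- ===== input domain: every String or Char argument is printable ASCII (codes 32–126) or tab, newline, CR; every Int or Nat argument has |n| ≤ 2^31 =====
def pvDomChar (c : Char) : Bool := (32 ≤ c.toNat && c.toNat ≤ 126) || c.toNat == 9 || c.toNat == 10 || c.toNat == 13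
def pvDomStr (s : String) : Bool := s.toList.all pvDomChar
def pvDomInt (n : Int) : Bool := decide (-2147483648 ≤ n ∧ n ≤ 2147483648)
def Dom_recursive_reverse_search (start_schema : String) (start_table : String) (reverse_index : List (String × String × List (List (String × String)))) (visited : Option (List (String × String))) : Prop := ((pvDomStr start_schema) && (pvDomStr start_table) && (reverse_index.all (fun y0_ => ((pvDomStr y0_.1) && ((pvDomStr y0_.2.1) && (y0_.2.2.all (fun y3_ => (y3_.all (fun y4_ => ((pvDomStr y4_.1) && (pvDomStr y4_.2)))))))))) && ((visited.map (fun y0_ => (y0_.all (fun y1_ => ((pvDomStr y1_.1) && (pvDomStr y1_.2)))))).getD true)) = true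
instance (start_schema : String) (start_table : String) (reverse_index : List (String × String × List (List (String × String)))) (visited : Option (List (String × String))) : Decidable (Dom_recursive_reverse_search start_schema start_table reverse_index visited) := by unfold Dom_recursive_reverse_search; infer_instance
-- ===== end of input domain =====

-- B replaces A's recursive DFS by an iterative DFS with an explicit stack of pending dependent
-- lists; same return value (Python A and B also mutate the passed-in visited set identically).


-- ===== PORT A =====
-- reverse_index.get(key, []) : the dict is the flattened triple list (schema, table, deps);
-- lookup = first match on the key pair (assoc-list dict convention).
def riGet (ri : List (String × String × List (List (String × String)))) (k : String × String) : List (List (String × String)) :=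
  match ri with
  | [] => []
  | (a, b, ds) :: rest => if (a, b) = k then ds else riGet rest k

-- (dep["schema"], dep["table_name"]) ; the defaults are never used under Pre_ (both keys present).
def depKey (d : List (String × String)) : String × String :=
  ((PySem.Dict.mk d).getD "schema" "", (PySem.Dict.mk d).getD "table_name" "")

-- the for-loop of A: threads (result, visited); `go` is the recursive call at the child fuel.
def loopA (go : (String × String) → List (String × String) → List (List (String × String)) × List (String × String)) :
    List (List (String × String)) → List (String × String) → List (List (String × String)) × List (String × String)
  | [], v => ([], v)
  | d :: rest, v =>
    let r := go (depKey d) v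
    let r2 := loopA go rest r.2
    (d :: (r.1 ++ r2.1), r2.2)

-- A's recursion, made total by a fuel guard (the 0 branch is unreachable at the fuel used below).
def goA (ri : List (String × String × List (List (String × String)))) :
    Nat → (String × String) → List (String × String) → List (List (String × String)) × List (String × String)
  | 0, _, v => ([], v)
  | Nat.succ n, k, v =>
    if PySem.Set.contains v k then ([], v)
    else loopA (goA ri n) (riGet ri k) (PySem.Set.add v k)

def recursive_reverse_search (start_schema : String) (start_table : String) (reverse_index : List (String × String × List (List (String × String)))) (visited : Option (List (String × String))) : List (List (String × String)) :=
  (goA reverse_index (reverse_index.length + 1) (start_schema, start_table) (visited.getD [])).1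

-- ===== PORT B =====
-- termination measure pieces for the iterative DFS
def stackW (fs : List (List (List (String × String)))) : Nat := (fs.map (fun f => f.length + 1)).sum
def totalLen (ri : List (String × String × List (List (String × String)))) : Nat := (ri.map (fun e => e.2.2.length)).sum
def cardRem (ri : List (String × String × List (List (String × String)))) (v : List (String × String)) : Nat :=
  ((ri.map (fun e => (e.1, e.2.1))).toFinset \ v.toFinset).card

-- facts the termination proof of runB cites
theorem riGet_len_le (ri : List (String × String × List (List (String × String)))) (k : String × String) :
    (riGet ri k).length ≤ totalLen ri := by
  induction ri with
  | nil => simp [riGet, totalLen]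
  | cons e rest ih =>
    obtain ⟨a, b, ds⟩ := e
    simp only [riGet, totalLen, List.map_cons, List.sum_cons]
    split
    · omega
    · have := ih
      simp only [totalLen] at this
      omega

theorem riGet_mem_keys (ri : List (String × String × List (List (String × String)))) (k : String × String)
    (h : riGet ri k ≠ []) : k ∈ ri.map (fun e => (e.1, e.2.1)) := by
  induction ri with
  | nil => simp [riGet] at h
  | cons e rest ih =>
    obtain ⟨a, b, ds⟩ := e
    simp only [riGet] at h
    by_cases hk : (a, b) = k
    · simp [hk]
    · simp only [if_neg hk] at h
      simpa using Or.inr (ih h)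

theorem toFinset_setAdd (v : List (String × String)) (k : String × String) :
    (PySem.Set.add v k).toFinset = insert k v.toFinset := by
  rw [PySem.Set.add_eq_ite v k]
  split
  · exact (Finset.insert_eq_self.mpr (List.mem_toFinset.mpr (by assumption))).symm
  · rw [List.toFinset_append]
    simp only [List.toFinset_cons, List.toFinset_nil, insert_empty_eq]
    rw [Finset.union_comm, Finset.singleton_union]

theorem cardRem_le_of_subset (ri : List (String × String × List (List (String × String))))
    {v w : List (String × String)} (h : ∀ x ∈ v, x ∈ w) : cardRem ri w ≤ cardRem ri v := by
  apply Finset.card_le_card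
  apply Finset.sdiff_subset_sdiff (Finset.Subset.refl _)
  intro x hx
  simp only [List.mem_toFinset] at *
  exact h x hx

theorem cardRem_add_le (ri : List (String × String × List (List (String × String))))
    (v : List (String × String)) (k : String × String) : cardRem ri (PySem.Set.add v k) ≤ cardRem ri v := by
  apply cardRem_le_of_subset
  intro x hx
  exact ((PySem.Set.mem_add _ _ _).mpr (Or.inl hx))

theorem cardRem_add_lt (ri : List (String × String × List (List (String × String))))
    (v : List (String × String)) (k : String × String)
    (hk : k ∈ ri.map (fun e => (e.1, e.2.1))) (hv : k ∉ v) :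
    cardRem ri (PySem.Set.add v k) < cardRem ri v := by
  unfold cardRem
  rw [toFinset_setAdd]
  apply Finset.card_lt_card
  constructor
  · exact Finset.sdiff_subset_sdiff (Finset.Subset.refl _) (by intro x hx; simp only [Finset.mem_insert]; exact Or.inr hx)
  · intro hsub
    have hk' : k ∈ (ri.map (fun e => (e.1, e.2.1))).toFinset \ v.toFinset := by
      simp [List.mem_toFinset, hk, hv]
    have := hsub hk'
    simp at this

-- the while-loop of B: stack of remaining dependent-list suffixes (= the Python iterators)
def runB (ri : List (String × String × List (List (String × String)))) :
    List (List (List (String × String))) → List (String × String) → List (List (String × String))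
  | [], _ => []
  | [] :: fs, v => runB ri fs v
  | (d :: rest) :: fs, v =>
    let k := depKey d
    if PySem.Set.contains v k then d :: runB ri (rest :: fs) v
    else
      let v1 := PySem.Set.add v k
      let ds := riGet ri k
      if ds.isEmpty then d :: runB ri (rest :: fs) v1
      else d :: runB ri (ds :: rest :: fs) v1
termination_by fs v => stackW fs + cardRem ri v * (totalLen ri + 2)
decreasing_by
  · simp only [stackW, List.map_cons, List.sum_cons]; omega
  · simp only [stackW, List.map_cons, List.sum_cons, List.length_cons]; omega
  · have h1 := cardRem_add_le ri v (depKey d)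
    have h2 : cardRem ri (PySem.Set.add v (depKey d)) * (totalLen ri + 2) ≤ cardRem ri v * (totalLen ri + 2) :=
      Nat.mul_le_mul_right _ h1
    simp only [stackW, List.map_cons, List.sum_cons, List.length_cons]
    omega
  · rename_i hnv hds
    have hds' : riGet ri (depKey d) ≠ [] := by
      intro h
      exact hds (by show (riGet ri (depKey d)).isEmpty = true; rw [h]; rfl)
    have hnv' : depKey d ∉ v := fun h => hnv ((PySem.Set.contains_iff v (depKey d)).mpr h)
    have hmem := riGet_mem_keys ri (depKey d) hds'
    have h1 := cardRem_add_lt ri v (depKey d) hmem hnv'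
    have h2 : cardRem ri (PySem.Set.add v (depKey d)) * (totalLen ri + 2) + (totalLen ri + 2) ≤ cardRem ri v * (totalLen ri + 2) := by
      have : cardRem ri (PySem.Set.add v (depKey d)) + 1 ≤ cardRem ri v := h1
      calc cardRem ri (PySem.Set.add v (depKey d)) * (totalLen ri + 2) + (totalLen ri + 2)
          = (cardRem ri (PySem.Set.add v (depKey d)) + 1) * (totalLen ri + 2) := by ring
        _ ≤ cardRem ri v * (totalLen ri + 2) := Nat.mul_le_mul_right _ this
    have h3 := riGet_len_le ri (depKey d)
    simp only [stackW, List.map_cons, List.sum_cons, List.length_cons]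
    omega

def recursive_reverse_search_alt (start_schema : String) (start_table : String) (reverse_index : List (String × String × List (List (String × String)))) (visited : Option (List (String × String))) : List (List (String × String)) :=
  let v0 := visited.getD []
  let k := (start_schema, start_table)
  if PySem.Set.contains v0 k then []
  else runB reverse_index [riGet reverse_index k] (PySem.Set.add v0 k)

-- ===== PRECONDITION & SPEC =====
-- Pre_ admits exactly the inputs on which Python A returns normally: A raises KeyError iff some
-- dependent dict of a key the search expands lacks a "schema" or "table_name" key; the expanded
-- keys are the reachability closure below (graph closure over well-formed dependent edges from the
-- start key, skipping keys already in visited).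
def wfDep (d : List (String × String)) : Bool :=
  d.any (fun p => p.1 == "schema") && d.any (fun p => p.1 == "table_name")

def reachStep (ri : List (String × String × List (List (String × String)))) (v0 : List (String × String)) (R : List (String × String)) : List (String × String) :=
  R.foldl (fun acc k =>
    (riGet ri k).foldl (fun acc d =>
      if wfDep d && !v0.contains (depKey d) && !acc.contains (depKey d) then acc ++ [depKey d]
      else acc) acc) R

def Pre_recursive_reverse_search (start_schema : String) (start_table : String) (reverse_index : List (String × String × List (List (String × String)))) (visited : Option (List (String × String))) : Prop :=
  ∀ k ∈ (reachStep reverse_index (visited.getD []))^[reverse_index.length + 1]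
      (if (visited.getD []).contains (start_schema, start_table) then [] else [(start_schema, start_table)]),
    ∀ d ∈ riGet reverse_index k, wfDep d = true
instance (start_schema : String) (start_table : String) (reverse_index : List (String × String × List (List (String × String)))) (visited : Option (List (String × String))) : Decidable (Pre_recursive_reverse_search start_schema start_table reverse_index visited) := by unfold Pre_recursive_reverse_search; infer_instance

def pvWitness_recursive_reverse_search : String × String × (List (String × String × List (List (String × String)))) × (Option (List (String × String))) :=
  ("a", "b", [("a", "b", [[("schema", "c"), ("table_name", "d")]]), ("c", "d", [[("schema", "a"), ("table_name", "b")]])], none)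

def Spec_recursive_reverse_search (start_schema : String) (start_table : String) (reverse_index : List (String × String × List (List (String × String)))) (visited : Option (List (String × String))) (out : List (List (String × String))) : Prop := out = recursive_reverse_search_alt start_schema start_table reverse_index visited
instance (start_schema : String) (start_table : String) (reverse_index : List (String × String × List (List (String × String)))) (visited : Option (List (String × String))) (out : List (List (String × String))) : Decidable (Spec_recursive_reverse_search start_schema start_table reverse_index visited out) := by unfold Spec_recursive_reverse_search; infer_instance

-- ===== CLAIM (what is proved, stated in full; the proofs are below) =====
def Claim_equal_recursive_reverse_search : Prop := ∀ (start_schema : String) (start_table : String) (reverse_index : List (String × String × List (List (String × String)))) (visited : Option (List (String × String))), Dom_recursive_reverse_search start_schema start_table reverse_index visited → Pre_recursive_reverse_search start_schema start_table reverse_index visited → Spec_recursive_reverse_search start_schema start_table reverse_index visited (recursive_reverse_search start_schema start_table reverse_index visited)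

-- ===== LEMMAS AND PROOFS =====

-- visited only grows through loopA / goA
theorem mono_loopA (go : (String × String) → List (String × String) → List (List (String × String)) × List (String × String))
    (hgo : ∀ k v, ∀ x ∈ v, x ∈ (go k v).2) :
    ∀ ds v, ∀ x ∈ v, x ∈ (loopA go ds v).2 := by
  intro ds
  induction ds with
  | nil => intro v x hx; simpa [loopA] using hx
  | cons d rest ih =>
    intro v x hx
    simp only [loopA]
    exact ih _ x (hgo _ _ x hx)

theorem mono_goA (ri : List (String × String × List (List (String × String)))) :
    ∀ n k v, ∀ x ∈ v, x ∈ (goA ri n k v).2 := by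
  intro n
  induction n with
  | zero => intro k v x hx; simpa [goA] using hx
  | succ n ih =>
    intro k v x hx
    simp only [goA]
    split
    · exact hx
    · exact mono_loopA _ ih _ _ x ((PySem.Set.mem_add _ _ _).mpr (Or.inl hx))

-- the simulation: running B's stack machine on one frame computes A's loop over that frame
theorem simB (ri : List (String × String × List (List (String × String)))) :
    ∀ (μ n : Nat) (deps : List (List (String × String))) (fs : List (List (List (String × String)))) (v : List (String × String)),
      stackW (deps :: fs) + cardRem ri v * (totalLen ri + 2) ≤ μ →
      cardRem ri v + 1 ≤ n →
      runB ri (deps :: fs) v =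
        (loopA (goA ri n) deps v).1 ++ runB ri fs (loopA (goA ri n) deps v).2 := by
  intro μ
  induction μ with
  | zero =>
    intro n deps fs v hmu _
    exfalso
    have h0 : 1 ≤ stackW (deps :: fs) := by
      simp only [stackW, List.map_cons, List.sum_cons]; omega
    have h2 : stackW (deps :: fs) ≤ 0 := le_trans (Nat.le_add_right _ _) hmu
    omega
  | succ μ ih =>
    intro n deps fs v hmu hn
    match deps with
    | [] => simp [runB, loopA]
    | d :: rest =>
      obtain ⟨m, rfl⟩ : ∃ m, n = m + 1 := ⟨n - 1, by omega⟩
      simp only [stackW, List.map_cons, List.sum_cons, List.length_cons] at hmu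
      by_cases hc : PySem.Set.contains v (depKey d) = true
      · have hcm : depKey d ∈ v := (PySem.Set.contains_iff v (depKey d)).mp hc
        have hA : goA ri (m + 1) (depKey d) v = ([], v) := by simp [goA, hc, hcm]
        have hB : runB ri ((d :: rest) :: fs) v = d :: runB ri (rest :: fs) v := by
          rw [runB]; simp [hc, hcm]
        rw [hB, ih (m + 1) rest fs v
          (by simp only [stackW, List.map_cons, List.sum_cons]; omega) hn]
        simp [loopA, hA]
      · have hnv : depKey d ∉ v := fun h => hc ((PySem.Set.contains_iff v (depKey d)).mpr h)
        have hgo : goA ri (m + 1) (depKey d) v =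
            loopA (goA ri m) (riGet ri (depKey d)) (PySem.Set.add v (depKey d)) := by
          simp [goA, hc, hnv]
        have hsub1 : ∀ x ∈ v, x ∈ PySem.Set.add v (depKey d) :=
          fun x hx => (PySem.Set.mem_add v (depKey d) x).mpr (Or.inl hx)
        have hc1 : cardRem ri (PySem.Set.add v (depKey d)) ≤ cardRem ri v := cardRem_add_le ri v (depKey d)
        have hmul1 : cardRem ri (PySem.Set.add v (depKey d)) * (totalLen ri + 2) ≤ cardRem ri v * (totalLen ri + 2) :=
          Nat.mul_le_mul_right _ hc1
        by_cases hds : riGet ri (depKey d) = []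
        · have hB : runB ri ((d :: rest) :: fs) v = d :: runB ri (rest :: fs) (PySem.Set.add v (depKey d)) := by
            rw [runB]; simp [hc, hnv, hds]
          have hA2 : loopA (goA ri m) (riGet ri (depKey d)) (PySem.Set.add v (depKey d)) =
              ([], PySem.Set.add v (depKey d)) := by rw [hds]; simp [loopA]
          rw [hB, ih (m + 1) rest fs (PySem.Set.add v (depKey d))
            (by simp only [stackW, List.map_cons, List.sum_cons]; omega) (by omega)]
          simp [loopA, hgo, hA2]
        · have hkmem := riGet_mem_keys ri (depKey d) hds
          have hlt : cardRem ri (PySem.Set.add v (depKey d)) < cardRem ri v :=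
            cardRem_add_lt ri v (depKey d) hkmem hnv
          have hlen := riGet_len_le ri (depKey d)
          have hB : runB ri ((d :: rest) :: fs) v =
              d :: runB ri (riGet ri (depKey d) :: rest :: fs) (PySem.Set.add v (depKey d)) := by
            rw [runB]
            simp [hc, hnv, hds]
          have hmul2 : cardRem ri (PySem.Set.add v (depKey d)) * (totalLen ri + 2) + (totalLen ri + 2) ≤
              cardRem ri v * (totalLen ri + 2) := by
            calc cardRem ri (PySem.Set.add v (depKey d)) * (totalLen ri + 2) + (totalLen ri + 2)
                = (cardRem ri (PySem.Set.add v (depKey d)) + 1) * (totalLen ri + 2) := by ring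
              _ ≤ cardRem ri v * (totalLen ri + 2) := Nat.mul_le_mul_right _ hlt
          have h1 := ih m (riGet ri (depKey d)) (rest :: fs) (PySem.Set.add v (depKey d))
            (by simp only [stackW, List.map_cons, List.sum_cons]; omega) (by omega)
          have hsub2 : ∀ x ∈ v, x ∈ (loopA (goA ri m) (riGet ri (depKey d)) (PySem.Set.add v (depKey d))).2 :=
            fun x hx => mono_loopA _ (mono_goA ri m) _ _ x (hsub1 x hx)
          have hc2 : cardRem ri (loopA (goA ri m) (riGet ri (depKey d)) (PySem.Set.add v (depKey d))).2 ≤ cardRem ri v :=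
            cardRem_le_of_subset ri hsub2
          have hmul3 : cardRem ri (loopA (goA ri m) (riGet ri (depKey d)) (PySem.Set.add v (depKey d))).2 * (totalLen ri + 2) ≤
              cardRem ri v * (totalLen ri + 2) := Nat.mul_le_mul_right _ hc2
          have h2 := ih (m + 1) rest fs (loopA (goA ri m) (riGet ri (depKey d)) (PySem.Set.add v (depKey d))).2
            (by simp only [stackW, List.map_cons, List.sum_cons]; omega) (by omega)
          rw [hB, h1, h2]
          simp [loopA, hgo]

-- cardRem of the start node after insertion is below ri.length (gives the top-level fuel bound)
theorem cardRem_start_le (ri : List (String × String × List (List (String × String))))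
    (v : List (String × String)) (k : String × String)
    (hk : k ∈ ri.map (fun e => (e.1, e.2.1))) :
    cardRem ri (PySem.Set.add v k) + 1 ≤ ri.length := by
  unfold cardRem
  rw [toFinset_setAdd]
  have hkK : k ∈ (ri.map (fun e => (e.1, e.2.1))).toFinset := List.mem_toFinset.mpr hk
  have e1 : ((ri.map (fun e => (e.1, e.2.1))).toFinset \ insert k v.toFinset).card ≤
      ((ri.map (fun e => (e.1, e.2.1))).toFinset.erase k).card := by
    apply Finset.card_le_card
    intro x hx
    rw [Finset.mem_sdiff] at hx
    rw [Finset.mem_erase]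
    exact ⟨fun h => hx.2 (by rw [h]; exact Finset.mem_insert_self _ _), hx.1⟩
  rw [Finset.card_erase_of_mem hkK] at e1
  have e2 : 1 ≤ (ri.map (fun e => (e.1, e.2.1))).toFinset.card :=
    Finset.card_pos.mpr ⟨k, hkK⟩
  have e3 : (ri.map (fun e => (e.1, e.2.1))).toFinset.card ≤ ri.length := by
    calc (ri.map (fun e => (e.1, e.2.1))).toFinset.card ≤ (ri.map (fun e => (e.1, e.2.1))).length :=
          List.toFinset_card_le _
      _ = ri.length := List.length_map ..
  omega

theorem recursive_reverse_search_spec : Claim_equal_recursive_reverse_search := by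
  intro s t ri vis _ _
  unfold Spec_recursive_reverse_search recursive_reverse_search recursive_reverse_search_alt
  by_cases hc : PySem.Set.contains (vis.getD []) (s, t) = true
  · have hcm : (s, t) ∈ vis.getD [] := (PySem.Set.contains_iff _ _).mp hc
    simp [goA, hc, hcm]
  · have hnv : (s, t) ∉ vis.getD [] := fun h => hc ((PySem.Set.contains_iff _ _).mpr h)
    simp only [goA, hc, hnv, Bool.false_eq_true, if_false, if_neg]
    by_cases hds : riGet ri (s, t) = []
    · simp [hds, runB, loopA, hc, hnv]
    · have hkmem := riGet_mem_keys ri (s, t) hds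
      have hn := cardRem_start_le ri (vis.getD []) (s, t) hkmem
      rw [simB ri (stackW [riGet ri (s, t)] + cardRem ri (PySem.Set.add (vis.getD []) (s, t)) * (totalLen ri + 2))
        ri.length (riGet ri (s, t)) [] (PySem.Set.add (vis.getD []) (s, t)) le_rfl hn]
      simp [runB, hc, hnv]
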